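-- pv_equiv track=rewrite | github.com/napolisiqueira/BootcampSantander-Python-BackEnd | DesafiosDeCodigo/SistemaDeAtendimentoMedico.py | classificar_pacientes
-- ===== SOURCE A (Python) =====
-- def ordenar_por_idade_desc(dicionario: dict) -> dict:
--     return dict(sorted(dicionario.items(), key=lambda item: item[1], reverse=True))
--
-- def classificar_pacientes(pacientes: list[tuple[str, int, str]]) -> list[str]:
--     grupos = {"maxima": {}, "urgente": {}, "idosos": {}, "normal": {}}
--
--     for nome, idade, status in pacientes:
--         if status == "urgente" and idade >= 60:
--             grupos["maxima"][nome] = idade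
--         elif status == "urgente":
--             grupos["urgente"][nome] = idade
--         elif idade >= 60:
--             grupos["idosos"][nome] = idade
--         else:
--             grupos["normal"][nome] = idade
--
--     for chave in grupos:
--         grupos[chave] = ordenar_por_idade_desc(grupos[chave])
--
--     fila = (
--         list(grupos["maxima"].keys()) +
--         list(grupos["urgente"].keys()) +
--         list(grupos["idosos"].keys()) +
--         list(grupos["normal"].keys())
--     )
--
--     return fila
-- ===== SOURCE B (Python) =====
-- def classificar_pacientes(pacientes: list[tuple[str, int, str]]) -> list[str]:
--     # One composite-keyed table + one stable global sort instead of four dicts and four sorts.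
--     tabela = {}  # (prioridade, nome) -> idade  (last idade wins; first position kept)
--     for nome, idade, status in pacientes:
--         if status == "urgente":
--             p = 0 if idade >= 60 else 1
--         else:
--             p = 2 if idade >= 60 else 3
--         tabela[(p, nome)] = idade
--     ordem = sorted(tabela.items(), key=lambda kv: (kv[0][0], -kv[1]))
--     return [kv[0][1] for kv in ordem]
-- ===== Notes on version B (the rewrite author's own statement) =====
-- stated objective: alternative
-- what changed: Replaces A's four separate group dicts, four independent sorts and concatenation by one table keyed by (priority, name) built in the same single pass plus one stable global sort on the composite key (priority, -idade), relying on sort stability for the first-insertion tie-break.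
import Mathlib
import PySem

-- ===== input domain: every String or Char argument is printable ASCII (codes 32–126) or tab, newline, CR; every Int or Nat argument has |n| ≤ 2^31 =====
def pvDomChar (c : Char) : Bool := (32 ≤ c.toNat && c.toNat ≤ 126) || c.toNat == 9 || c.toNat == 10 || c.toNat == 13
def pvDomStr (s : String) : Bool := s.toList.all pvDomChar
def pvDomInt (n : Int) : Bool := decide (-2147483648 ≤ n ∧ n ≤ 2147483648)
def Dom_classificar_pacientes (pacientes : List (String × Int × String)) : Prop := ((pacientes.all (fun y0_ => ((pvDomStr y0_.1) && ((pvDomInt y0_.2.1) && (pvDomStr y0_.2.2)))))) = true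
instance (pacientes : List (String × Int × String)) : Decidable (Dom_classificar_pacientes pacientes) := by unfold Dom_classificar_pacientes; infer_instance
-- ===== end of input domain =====

-- B replaces A's four group dicts + four per-group sorts + concatenation by ONE table keyed by
-- (priority, name) and ONE stable global sort — an alternative decomposition of the same cost.

-- ===== PORT A =====
-- A's 'grupos' dict has the four fixed literal keys "maxima","urgente","idosos","normal" in that
-- insertion order; it is represented as a 4-tuple in that order, and the Python loop
-- 'for chave in grupos: grupos[chave] = ordenar_por_idade_desc(grupos[chave])' becomes applying
-- ordenar_por_idade_desc to each component in that same order — exact for this fixed-key dict.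
def ordenar_por_idade_desc (dicionario : PySem.Dict String Int) : PySem.Dict String Int :=
  PySem.Dict.ofList (PySem.List.sorted dicionario.items (fun item => item.2) true)

def classificar_pacientes (pacientes : List (String × Int × String)) : List String :=
  let grupos :=
    pacientes.foldl
      (fun (g : PySem.Dict String Int × PySem.Dict String Int × PySem.Dict String Int × PySem.Dict String Int) x =>
        if x.2.2 = "urgente" ∧ x.2.1 ≥ 60 then (g.1.insert x.1 x.2.1, g.2.1, g.2.2.1, g.2.2.2)
        else if x.2.2 = "urgente" then (g.1, g.2.1.insert x.1 x.2.1, g.2.2.1, g.2.2.2)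
        else if x.2.1 ≥ 60 then (g.1, g.2.1, g.2.2.1.insert x.1 x.2.1, g.2.2.2)
        else (g.1, g.2.1, g.2.2.1, g.2.2.2.insert x.1 x.2.1))
      (PySem.Dict.empty, PySem.Dict.empty, PySem.Dict.empty, PySem.Dict.empty)
  (ordenar_por_idade_desc grupos.1).keys ++ (ordenar_por_idade_desc grupos.2.1).keys ++
    (ordenar_por_idade_desc grupos.2.2.1).keys ++ (ordenar_por_idade_desc grupos.2.2.2).keys

-- ===== PORT B =====
def pvPrioridade (idade : Int) (status : String) : Int :=
  if status = "urgente" then (if idade ≥ 60 then 0 else 1) else (if idade ≥ 60 then 2 else 3)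

def classificar_pacientes_alt (pacientes : List (String × Int × String)) : List String :=
  let tabela :=
    pacientes.foldl
      (fun (t : PySem.Dict (Int × String) Int) x => t.insert (pvPrioridade x.2.1 x.2.2, x.1) x.2.1)
      PySem.Dict.empty
  (PySem.List.sorted2 tabela.items (fun kv => kv.1.1) (fun kv => -kv.2) false).map (fun kv => kv.1.2)

-- ===== PRECONDITION & SPEC =====
def Spec_classificar_pacientes (pacientes : List (String × Int × String)) (out : List String) : Prop := out = classificar_pacientes_alt pacientes
instance (pacientes : List (String × Int × String)) (out : List String) : Decidable (Spec_classificar_pacientes pacientes out) := by unfold Spec_classificar_pacientes; infer_instance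

-- ===== CLAIM (what is proved, stated in full; the proofs are below) =====
def Claim_equal_classificar_pacientes : Prop := ∀ (pacientes : List (String × Int × String)), Dom_classificar_pacientes pacientes → Spec_classificar_pacientes pacientes (classificar_pacientes pacientes)

-- ===== LEMMAS AND PROOFS =====

-- filter of B's table down to one priority, and the projection to A's group-dict items
def pvF (p : Int) (l : List ((Int × String) × Int)) : List ((Int × String) × Int) :=
  l.filter (fun kv => kv.1.1 == p)

def pvProj (kv : (Int × String) × Int) : String × Int := (kv.1.2, kv.2)

-- generic insertBy facts
lemma pv_insertBy_append_front {α : Type} (before : α → α → Bool) (x : α) (A B : List α)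
    (h : ∀ a ∈ A, before x a = false) :
    PySem.List.insertBy before x (A ++ B) = A ++ PySem.List.insertBy before x B := by
  induction A with
  | nil => rfl
  | cons a A ih =>
    simp only [List.cons_append, PySem.List.insertBy, h a (by simp)]
    simp only [Bool.false_eq_true, if_false, List.cons.injEq, true_and]
    exact ih (fun a ha => h a (by simp [ha]))

lemma pv_insertBy_append_back {α : Type} (before : α → α → Bool) (x : α) (A B : List α)
    (h : ∀ b ∈ B, before x b = true) :
    PySem.List.insertBy before x (A ++ B) = PySem.List.insertBy before x A ++ B := by
  induction A with
  | nil =>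
    cases B with
    | nil => rfl
    | cons b B => simp [PySem.List.insertBy, h b (by simp)]
  | cons a A ih =>
    by_cases hx : before x a = true
    · simp [PySem.List.insertBy, hx]
    · simp only [List.cons_append, PySem.List.insertBy, hx]
      simp only [Bool.false_eq_true, if_false, List.cons_append, List.cons.injEq, true_and]
      exact ih

lemma pv_insertBy_congr {α : Type} (b b' : α → α → Bool) (x : α) (l : List α)
    (h : ∀ y ∈ l, b x y = b' x y) :
    PySem.List.insertBy b x l = PySem.List.insertBy b' x l := by
  induction l with
  | nil => rfl
  | cons y l ih =>
    simp only [PySem.List.insertBy, h y (by simp)]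
    by_cases hy : b' x y = true
    · simp [hy]
    · simp only [hy, Bool.false_eq_true, if_false, List.cons.injEq, true_and]
      exact ih (fun z hz => h z (by simp [hz]))

lemma pv_insertBy_map {α β : Type} (f : α → β) (bf : β → β → Bool) (b : α → α → Bool) (x : α)
    (hb : ∀ a c, bf (f a) (f c) = b a c) (acc : List α) :
    PySem.List.insertBy bf (f x) (acc.map f) = (PySem.List.insertBy b x acc).map f := by
  induction acc with
  | nil => rfl
  | cons a acc ih =>
    simp only [List.map_cons, PySem.List.insertBy, hb x a]
    by_cases ha : b x a = true
    · simp [ha]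
    · simp only [ha, Bool.false_eq_true, if_false, List.map_cons, List.cons.injEq, true_and]
      exact ih

lemma pv_foldl_insertBy_map {α β : Type} (f : α → β) (bf : β → β → Bool) (b : α → α → Bool)
    (hb : ∀ a c, bf (f a) (f c) = b a c) (l acc : List α) :
    List.foldl (fun ac y => PySem.List.insertBy bf y ac) (acc.map f) (l.map f)
      = (List.foldl (fun ac y => PySem.List.insertBy b y ac) acc l).map f := by
  induction l generalizing acc with
  | nil => rfl
  | cons x l ih =>
    simp only [List.map_cons, List.foldl_cons]
    rw [pv_insertBy_map f bf b x hb acc]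
    exact ih (PySem.List.insertBy b x acc)

-- sorted of a mapped list (reverse=True shape, the one A uses)
lemma pv_sorted_rev_map {α β κ : Type} [LT κ] [DecidableLT κ] (f : α → β) (key : β → κ) (l : List α) :
    PySem.List.sorted (l.map f) key true = (PySem.List.sorted l (fun a => key (f a)) true).map f := by
  rw [PySem.List.sorted_rev_eq_foldl_insertBy, PySem.List.sorted_rev_eq_foldl_insertBy]
  exact pv_foldl_insertBy_map f _ _ (fun a c => rfl) l []

-- Python's stable reverse sort on an Int key is the stable forward sort on the negated key
lemma pv_sorted_rev_neg {α : Type} (key : α → Int) (l : List α) :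
    PySem.List.sorted l key true = PySem.List.sorted l (fun a => -(key a)) false := by
  rw [PySem.List.sorted_rev_eq_foldl_insertBy, PySem.List.sorted_eq_foldl_insertBy]
  have h : (fun (a b : α) => decide (-(key a) < -(key b))) = fun a b => decide (key b < key a) := by
    funext a b
    simp only [decide_eq_decide]
    omega
  rw [h]

-- keys of dict(sorted-items) when the key column is duplicate-free
lemma pv_keys_ofList {ν : Type} (l : List (String × ν)) (h : (l.map Prod.fst).Nodup) :
    (PySem.Dict.ofList l).keys = l.map Prod.fst := by
  have : (PySem.Dict.ofList l).items = PySem.Dict.empty.items ++ l.map (fun a => (a.1, a.2)) := by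
    exact PySem.Dict.items_foldl_insert_fresh l Prod.fst Prod.snd PySem.Dict.empty
      (fun a _ => PySem.Dict.contains_empty a.1) h
  simp only [PySem.Dict.keys, this]
  simp [PySem.Dict.empty]

-- the comparison sorted2 uses on the composite (priority, -idade) key
def pvLex (a b : (Int × String) × Int) : Bool :=
  decide (a.1.1 < b.1.1) || (!decide (b.1.1 < a.1.1) && decide (-a.2 < -b.2))

lemma pv_sorted2_eq_foldl (l : List ((Int × String) × Int)) :
    PySem.List.sorted2 l (fun kv => kv.1.1) (fun kv => -kv.2) false
      = List.foldl (fun acc x => PySem.List.insertBy pvLex x acc) [] l := rfl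

lemma pv_sorted_snoc (A : List ((Int × String) × Int)) (x : (Int × String) × Int) :
    PySem.List.sorted (A ++ [x]) (fun kv => -kv.2) false
      = PySem.List.insertBy (fun a b => decide (-a.2 < -b.2)) x
          (PySem.List.sorted A (fun kv => -kv.2) false) := by
  rw [PySem.List.sorted_eq_foldl_insertBy, PySem.List.sorted_eq_foldl_insertBy,
      List.foldl_append]
  rfl

-- the one global stable sort on the composite key splits into the four per-priority sorts
lemma pv_sorted2_split (l : List ((Int × String) × Int))
    (h : ∀ kv ∈ l, kv.1.1 = 0 ∨ kv.1.1 = 1 ∨ kv.1.1 = 2 ∨ kv.1.1 = 3) :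
    PySem.List.sorted2 l (fun kv => kv.1.1) (fun kv => -kv.2) false
      = PySem.List.sorted (pvF 0 l) (fun kv => -kv.2) false
        ++ PySem.List.sorted (pvF 1 l) (fun kv => -kv.2) false
        ++ PySem.List.sorted (pvF 2 l) (fun kv => -kv.2) false
        ++ PySem.List.sorted (pvF 3 l) (fun kv => -kv.2) false := by
  induction l using List.reverseRecOn with
  | nil => rfl
  | append_singleton l x ih =>
    have hx := h x (by simp)
    have hl : ∀ kv ∈ l, kv.1.1 = 0 ∨ kv.1.1 = 1 ∨ kv.1.1 = 2 ∨ kv.1.1 = 3 :=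
      fun kv hkv => h kv (by simp [hkv])
    have e1 : PySem.List.sorted2 (l ++ [x]) (fun kv => kv.1.1) (fun kv => -kv.2) false
        = PySem.List.insertBy pvLex x
            (PySem.List.sorted2 l (fun kv => kv.1.1) (fun kv => -kv.2) false) := by
      rw [pv_sorted2_eq_foldl, pv_sorted2_eq_foldl, List.foldl_append]
      rfl
    have hmem : ∀ (q : Int) (y : (Int × String) × Int),
        y ∈ PySem.List.sorted (pvF q l) (fun kv => -kv.2) false → y.1.1 = q := by
      intro q y hy
      have := (PySem.List.mem_sorted (pvF q l) (fun kv => -kv.2) false y).mp hy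
      simpa [beq_iff_eq] using (List.mem_filter.mp this).2
    have hF : ∀ (q : Int), x.1.1 ≠ q → pvF q (l ++ [x]) = pvF q l := by
      intro q hq
      simp [pvF, List.filter_append, hq]
    have hFx : ∀ (q : Int), x.1.1 = q → pvF q (l ++ [x]) = pvF q l ++ [x] := by
      intro q hq
      simp [pvF, List.filter_append, hq]
    rw [e1, ih hl]
    simp only [List.append_assoc]
    have hcongr : ∀ (q : Int), x.1.1 = q →
        PySem.List.insertBy pvLex x (PySem.List.sorted (pvF q l) (fun kv => -kv.2) false)
          = PySem.List.sorted (pvF q (l ++ [x])) (fun kv => -kv.2) false := by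
      intro q hq
      rw [hFx q hq, pv_sorted_snoc]
      apply pv_insertBy_congr
      intro y hy
      have hyq := hmem q y hy
      simp only [pvLex, hq, hyq]
      norm_num
    rcases hx with hp | hp | hp | hp
    · rw [pv_insertBy_append_back pvLex x _ _
            (fun b hb => by
              rcases List.mem_append.mp hb with hb | hb
              · have := hmem 1 b hb; simp only [pvLex, hp, this]; norm_num
              · rcases List.mem_append.mp hb with hb | hb
                · have := hmem 2 b hb; simp only [pvLex, hp, this]; norm_num
                · have := hmem 3 b hb; simp only [pvLex, hp, this]; norm_num),
          hcongr 0 hp, hF 1 (by rw [hp]; norm_num), hF 2 (by rw [hp]; norm_num),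
          hF 3 (by rw [hp]; norm_num)]
    · rw [pv_insertBy_append_front pvLex x _ _
            (fun a ha => by have := hmem 0 a ha; simp only [pvLex, hp, this]; norm_num),
          pv_insertBy_append_back pvLex x _ _
            (fun b hb => by
              rcases List.mem_append.mp hb with hb | hb
              · have := hmem 2 b hb; simp only [pvLex, hp, this]; norm_num
              · have := hmem 3 b hb; simp only [pvLex, hp, this]; norm_num),
          hcongr 1 hp, hF 0 (by rw [hp]; norm_num), hF 2 (by rw [hp]; norm_num),
          hF 3 (by rw [hp]; norm_num)]
    · rw [pv_insertBy_append_front pvLex x _ _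
            (fun a ha => by have := hmem 0 a ha; simp only [pvLex, hp, this]; norm_num),
          pv_insertBy_append_front pvLex x _ _
            (fun a ha => by have := hmem 1 a ha; simp only [pvLex, hp, this]; norm_num),
          pv_insertBy_append_back pvLex x _ _
            (fun b hb => by have := hmem 3 b hb; simp only [pvLex, hp, this]; norm_num),
          hcongr 2 hp, hF 0 (by rw [hp]; norm_num), hF 1 (by rw [hp]; norm_num),
          hF 3 (by rw [hp]; norm_num)]
    · rw [pv_insertBy_append_front pvLex x _ _
            (fun a ha => by have := hmem 0 a ha; simp only [pvLex, hp, this]; norm_num),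
          pv_insertBy_append_front pvLex x _ _
            (fun a ha => by have := hmem 1 a ha; simp only [pvLex, hp, this]; norm_num),
          pv_insertBy_append_front pvLex x _ _
            (fun a ha => by have := hmem 2 a ha; simp only [pvLex, hp, this]; norm_num),
          hcongr 3 hp, hF 0 (by rw [hp]; norm_num), hF 1 (by rw [hp]; norm_num),
          hF 2 (by rw [hp]; norm_num)]

-- a .1-preserving per-element rewrite commutes with the priority filter
lemma pv_filter_map_swap {p : Int} {r : (Int × String) × Int → (Int × String) × Int}
    (hr : ∀ kv, (r kv).1 = kv.1) (l : List ((Int × String) × Int)) :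
    pvF p (l.map r) = (pvF p l).map r := by
  simp only [pvF, List.filter_map]
  congr 1
  apply List.filter_congr
  intro kv _
  simp [Function.comp, hr kv]

-- the step of the two build loops preserves the group↔table relation
lemma pv_insert_eq (t : PySem.Dict (Int × String) Int) (d : PySem.Dict String Int)
    (p : Int) (nome : String) (idade : Int)
    (hd : d.items = (pvF p t.items).map pvProj) :
    (d.insert nome idade).items = (pvF p (t.insert (p, nome) idade).items).map pvProj := by
  by_cases hc : t.contains (p, nome) = true
  · have hdc : d.contains nome = true := by
      simp only [PySem.Dict.contains, List.any_eq_true, beq_iff_eq] at hc ⊢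
      obtain ⟨kv, hkv, hk1⟩ := hc
      refine ⟨pvProj kv, ?_, by simp [pvProj, hk1]⟩
      rw [hd]
      exact List.mem_map_of_mem (List.mem_filter.mpr ⟨hkv, by simp [hk1]⟩)
    rw [PySem.Dict.items_insert_of_contains t idade hc,
        PySem.Dict.items_insert_of_contains d idade hdc, hd,
        pv_filter_map_swap (fun kv => by by_cases h1 : (kv.1 == (p, nome)) = true <;>
          simp_all [beq_iff_eq])]
    simp only [List.map_map]
    refine List.map_congr_left (fun kv hkv => ?_)
    have hp : kv.1.1 = p := by
      have := (List.mem_filter.mp hkv).2; simpa [beq_iff_eq] using this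
    by_cases hn : kv.1.2 = nome
    · have : kv.1 = (p, nome) := by
        cases kv with | mk k v => cases k with | mk a b => simp_all
      simp [pvProj, this]
    · have : kv.1 ≠ (p, nome) := fun h => hn (by rw [h])
      simp [pvProj, this, hn]
  · have hdc : d.contains nome = false := by
      by_contra habs
      rw [Bool.not_eq_false, PySem.Dict.contains, List.any_eq_true] at habs
      obtain ⟨qv, hq, hq1⟩ := habs
      rw [hd] at hq
      obtain ⟨kv, hkv, rfl⟩ := List.mem_map.mp hq
      have hp : kv.1.1 = p := by
        have := (List.mem_filter.mp hkv).2; simpa [beq_iff_eq] using this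
      have hn : kv.1.2 = nome := by simpa [pvProj, beq_iff_eq] using hq1
      have hk : kv.1 = (p, nome) := Prod.ext_iff.mpr ⟨hp, hn⟩
      have ht : t.contains (p, nome) = true := by
        rw [PySem.Dict.contains, List.any_eq_true]
        exact ⟨kv, (List.mem_filter.mp hkv).1, by simp [hk]⟩
      exact hc ht
    rw [PySem.Dict.items_insert_of_not_contains t idade (by simpa using hc),
        PySem.Dict.items_insert_of_not_contains d idade hdc, hd]
    simp [pvF, pvProj, List.filter_append]

lemma pv_insert_ne (t : PySem.Dict (Int × String) Int) (d : PySem.Dict String Int)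
    (p q : Int) (nome : String) (idade : Int) (hpq : q ≠ p)
    (hd : d.items = (pvF p t.items).map pvProj) :
    d.items = (pvF p (t.insert (q, nome) idade).items).map pvProj := by
  by_cases hc : t.contains (q, nome) = true
  · rw [PySem.Dict.items_insert_of_contains t idade hc,
        pv_filter_map_swap (fun kv => by by_cases h1 : (kv.1 == (q, nome)) = true <;>
          simp_all [beq_iff_eq])]
    have hid : (pvF p t.items).map
        (fun kv => if (kv.1 == (q, nome)) = true then ((q, nome), idade) else kv)
        = pvF p t.items := by
      have h1 : ∀ kv ∈ pvF p t.items,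
          (if (kv.1 == (q, nome)) = true then ((q, nome), idade) else kv) = id kv := by
        intro kv hkv
        have hp : kv.1.1 = p := by
          have := (List.mem_filter.mp hkv).2; simpa [beq_iff_eq] using this
        have : kv.1 ≠ (q, nome) := by
          intro h; exact hpq (by rw [← hp, h])
        simp [this]
      rw [List.map_congr_left h1, List.map_id]
    rw [hid, hd]
  · rw [PySem.Dict.items_insert_of_not_contains t idade (by simpa using hc)]
    simp [pvF, List.filter_append, hpq, hd]

def pvRel (t : PySem.Dict (Int × String) Int)
    (g : PySem.Dict String Int × PySem.Dict String Int × PySem.Dict String Int × PySem.Dict String Int) : Prop :=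
  g.1.items = (pvF 0 t.items).map pvProj ∧ g.2.1.items = (pvF 1 t.items).map pvProj ∧
  g.2.2.1.items = (pvF 2 t.items).map pvProj ∧ g.2.2.2.items = (pvF 3 t.items).map pvProj ∧
  g.1.keys.Nodup ∧ g.2.1.keys.Nodup ∧ g.2.2.1.keys.Nodup ∧ g.2.2.2.keys.Nodup ∧
  (∀ kv ∈ t.items, kv.1.1 = 0 ∨ kv.1.1 = 1 ∨ kv.1.1 = 2 ∨ kv.1.1 = 3)

lemma pv_inv (l : List (String × Int × String)) (t : PySem.Dict (Int × String) Int)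
    (g : PySem.Dict String Int × PySem.Dict String Int × PySem.Dict String Int × PySem.Dict String Int)
    (hrel : pvRel t g) :
    pvRel
      (l.foldl (fun t x => t.insert (pvPrioridade x.2.1 x.2.2, x.1) x.2.1) t)
      (l.foldl
        (fun (g : PySem.Dict String Int × PySem.Dict String Int × PySem.Dict String Int × PySem.Dict String Int) x =>
          if x.2.2 = "urgente" ∧ x.2.1 ≥ 60 then (g.1.insert x.1 x.2.1, g.2.1, g.2.2.1, g.2.2.2)
          else if x.2.2 = "urgente" then (g.1, g.2.1.insert x.1 x.2.1, g.2.2.1, g.2.2.2)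
          else if x.2.1 ≥ 60 then (g.1, g.2.1, g.2.2.1.insert x.1 x.2.1, g.2.2.2)
          else (g.1, g.2.1, g.2.2.1, g.2.2.2.insert x.1 x.2.1)) g) := by
  induction l generalizing t g with
  | nil => simpa using hrel
  | cons x l ih =>
    obtain ⟨h0, h1, h2, h3, n0, n1, n2, n3, hmem⟩ := hrel
    simp only [List.foldl_cons]
    have hmem' : ∀ (q : Int), ∀ kv ∈ (t.insert (q, x.1) x.2.1).items,
        (kv.1.1 = 0 ∨ kv.1.1 = 1 ∨ kv.1.1 = 2 ∨ kv.1.1 = 3) ∨ kv.1.1 = q := by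
      intro q kv hkv
      rcases (PySem.Dict.mem_items_insert t (q, x.1) x.2.1 kv).mp hkv with h | ⟨h, _⟩
      · right; rw [h]
      · exact Or.inl (hmem kv h)
    by_cases hs : x.2.2 = "urgente"
    · by_cases hi : x.2.1 ≥ 60
      · have hp : pvPrioridade x.2.1 x.2.2 = 0 := by simp [pvPrioridade, hs, hi]
        rw [if_pos ⟨hs, hi⟩, hp]
        apply ih
        refine ⟨pv_insert_eq t g.1 0 x.1 x.2.1 h0,
          pv_insert_ne t g.2.1 1 0 x.1 x.2.1 (by norm_num) h1,
          pv_insert_ne t g.2.2.1 2 0 x.1 x.2.1 (by norm_num) h2,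
          pv_insert_ne t g.2.2.2 3 0 x.1 x.2.1 (by norm_num) h3,
          PySem.Dict.nodup_keys_insert g.1 x.1 x.2.1 n0, n1, n2, n3, ?_⟩
        intro kv hkv
        rcases hmem' 0 kv hkv with h | h
        · exact h
        · exact Or.inl h
      · have hp : pvPrioridade x.2.1 x.2.2 = 1 := by simp [pvPrioridade, hs, hi]
        rw [if_neg (fun h => hi h.2), if_pos hs, hp]
        apply ih
        refine ⟨pv_insert_ne t g.1 0 1 x.1 x.2.1 (by norm_num) h0,
          pv_insert_eq t g.2.1 1 x.1 x.2.1 h1,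
          pv_insert_ne t g.2.2.1 2 1 x.1 x.2.1 (by norm_num) h2,
          pv_insert_ne t g.2.2.2 3 1 x.1 x.2.1 (by norm_num) h3,
          n0, PySem.Dict.nodup_keys_insert g.2.1 x.1 x.2.1 n1, n2, n3, ?_⟩
        intro kv hkv
        rcases hmem' 1 kv hkv with h | h
        · exact h
        · exact Or.inr (Or.inl h)
    · by_cases hi : x.2.1 ≥ 60
      · have hp : pvPrioridade x.2.1 x.2.2 = 2 := by simp [pvPrioridade, hs, hi]
        rw [if_neg (fun h => hs h.1), if_neg hs, if_pos hi, hp]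
        apply ih
        refine ⟨pv_insert_ne t g.1 0 2 x.1 x.2.1 (by norm_num) h0,
          pv_insert_ne t g.2.1 1 2 x.1 x.2.1 (by norm_num) h1,
          pv_insert_eq t g.2.2.1 2 x.1 x.2.1 h2,
          pv_insert_ne t g.2.2.2 3 2 x.1 x.2.1 (by norm_num) h3,
          n0, n1, PySem.Dict.nodup_keys_insert g.2.2.1 x.1 x.2.1 n2, n3, ?_⟩
        intro kv hkv
        rcases hmem' 2 kv hkv with h | h
        · exact h
        · exact Or.inr (Or.inr (Or.inl h))
      · have hp : pvPrioridade x.2.1 x.2.2 = 3 := by simp [pvPrioridade, hs, hi]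
        rw [if_neg (fun h => hs h.1), if_neg hs, if_neg hi, hp]
        apply ih
        refine ⟨pv_insert_ne t g.1 0 3 x.1 x.2.1 (by norm_num) h0,
          pv_insert_ne t g.2.1 1 3 x.1 x.2.1 (by norm_num) h1,
          pv_insert_ne t g.2.2.1 2 3 x.1 x.2.1 (by norm_num) h2,
          pv_insert_eq t g.2.2.2 3 x.1 x.2.1 h3,
          n0, n1, n2, PySem.Dict.nodup_keys_insert g.2.2.2 x.1 x.2.1 n3, ?_⟩
        intro kv hkv
        rcases hmem' 3 kv hkv with h | h
        · exact h
        · exact Or.inr (Or.inr (Or.inr h))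

-- one group: A's "sort the group dict, take its keys" is B's per-priority slice of the global sort
lemma pv_group (t : PySem.Dict (Int × String) Int) (d : PySem.Dict String Int) (p : Int)
    (hd : d.items = (pvF p t.items).map pvProj) (hnd : d.keys.Nodup) :
    (ordenar_por_idade_desc d).keys
      = (PySem.List.sorted (pvF p t.items) (fun kv => -kv.2) false).map (fun kv => kv.1.2) := by
  unfold ordenar_por_idade_desc
  have hperm : (PySem.List.sorted d.items (fun item => item.2) true).Perm d.items :=
    PySem.List.sorted_perm d.items (fun item => item.2) true
  have hnd2 : ((PySem.List.sorted d.items (fun item => item.2) true).map Prod.fst).Nodup := by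
    refine ((hperm.map Prod.fst).nodup_iff).mpr ?_
    simpa [PySem.Dict.keys] using hnd
  rw [pv_keys_ofList _ hnd2, hd,
      pv_sorted_rev_map pvProj (fun item => item.2) (pvF p t.items), List.map_map]
  have hneg : PySem.List.sorted (pvF p t.items) (fun a => (pvProj a).2) true
      = PySem.List.sorted (pvF p t.items) (fun kv => -kv.2) false :=
    pv_sorted_rev_neg (fun kv => kv.2) (pvF p t.items)
  rw [hneg]
  rfl

-- ===== VERDICT (by name: the statement is the Claim_ definition above) =====
theorem classificar_pacientes_spec : Claim_equal_classificar_pacientes := by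
  intro pacientes _
  unfold Spec_classificar_pacientes
  have hbase : pvRel PySem.Dict.empty
      (PySem.Dict.empty, PySem.Dict.empty, PySem.Dict.empty, PySem.Dict.empty) := by
    refine ⟨rfl, rfl, rfl, rfl, PySem.Dict.nodup_keys_empty, PySem.Dict.nodup_keys_empty,
      PySem.Dict.nodup_keys_empty, PySem.Dict.nodup_keys_empty, ?_⟩
    intro kv hkv
    simp [PySem.Dict.empty] at hkv
  obtain ⟨h0, h1, h2, h3, n0, n1, n2, n3, hmem⟩ :=
    pv_inv pacientes PySem.Dict.empty
      (PySem.Dict.empty, PySem.Dict.empty, PySem.Dict.empty, PySem.Dict.empty) hbase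
  simp only [classificar_pacientes, classificar_pacientes_alt]
  rw [pv_group _ _ 0 h0 n0, pv_group _ _ 1 h1 n1, pv_group _ _ 2 h2 n2, pv_group _ _ 3 h3 n3,
      pv_sorted2_split _ hmem]
  simp [List.map_append]
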